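-- pv_equiv track=rewrite | github.com/danielgyorgy224/waiter_hf | waiter.py | minuszt_keres
-- ===== SOURCE A (Python) =====
-- def minuszt_keres(l):
--     v = False
--     i = 0
--     while i < len(l) and l[i] >= 0:
--         i+=1
--     if i < len(l):
--         v = True
--     return v
-- ===== SOURCE B (Python) =====
-- def minuszt_keres(l):
--     if not l:
--         return False
--     return min(l) < 0
-- ===== Notes on version B (the rewrite author's own statement) =====
-- stated objective: simpler
-- what changed: Replaces the index-based early-exit scan with a full reduction: guard the empty list, then compare min(l) < 0 once.
import Mathlib
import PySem

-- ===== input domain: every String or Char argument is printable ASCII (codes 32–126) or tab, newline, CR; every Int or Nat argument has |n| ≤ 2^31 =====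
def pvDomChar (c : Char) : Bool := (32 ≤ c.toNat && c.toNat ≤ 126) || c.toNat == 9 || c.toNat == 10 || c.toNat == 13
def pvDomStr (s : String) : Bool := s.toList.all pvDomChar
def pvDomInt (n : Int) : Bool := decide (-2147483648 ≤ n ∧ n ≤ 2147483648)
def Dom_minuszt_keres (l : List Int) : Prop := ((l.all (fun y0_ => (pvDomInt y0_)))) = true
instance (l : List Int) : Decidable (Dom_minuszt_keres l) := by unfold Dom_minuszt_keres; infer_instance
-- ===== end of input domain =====

-- B replaces A's early-exit index scan with a guard for [] plus a single min(l) < 0 comparison (simpler).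

-- ===== PORT A =====
-- the while loop: advance i while i < len(l) and l[i] >= 0; returns the final i
def minusztLoop (l : List Int) (i : Nat) : Nat :=
  if h : i < l.length ∧ (PySem.List.pyGetD l (Int.ofNat i) 0) ≥ 0 then
    minusztLoop l (i + 1)
  else i
termination_by l.length - i
decreasing_by omega

def minuszt_keres (l : List Int) : Bool :=
  -- v = False; while …; if i < len(l): v = True; return v
  let i := minusztLoop l 0
  if i < l.length then true else false

-- ===== PORT B =====
def minuszt_keres_alt (l : List Int) : Bool :=
  if l = [] then false
  else
    match PySem.List.min? l (fun x => x) with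
    | some m => decide (m < 0)
    | none => false

-- ===== PRECONDITION & SPEC =====
def Spec_minuszt_keres (l : List Int) (out : Bool) : Prop := out = minuszt_keres_alt l
instance (l : List Int) (out : Bool) : Decidable (Spec_minuszt_keres l out) := by unfold Spec_minuszt_keres; infer_instance

-- ===== CLAIM (what is proved, stated in full; the proofs are below) =====
def Claim_equal_minuszt_keres : Prop := ∀ (l : List Int), Dom_minuszt_keres l → Spec_minuszt_keres l (minuszt_keres l)

-- ===== LEMMAS AND PROOFS =====

-- A's loop stops exactly at the first negative element (or the length); so the
-- result flag is "some element is negative".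
lemma minusztLoop_lt_of_neg (l : List Int) (i : Nat)
    (hex : ∃ j, i ≤ j ∧ ∃ h : j < l.length, l[j] < 0) :
    minusztLoop l i < l.length := by
  obtain ⟨j, hij, hj, hneg⟩ := hex
  induction hn : l.length - i using Nat.strong_induction_on generalizing i with
  | _ n ih =>
    rw [minusztLoop]
    split
    · next h =>
      rcases h with ⟨hi, hge⟩
      have hne : i ≠ j := by
        intro he; subst he
        have : PySem.List.pyGetD l (Int.ofNat i) 0 = l[i] := by
          simp [PySem.List.pyGetD, PySem.List.pyGet?, PySem.List.pyIdx?, hi]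
        rw [this] at hge; omega
      exact ih (l.length - (i+1)) (by omega) (i+1) (by omega) rfl
    · next h =>
      push_neg at h
      by_cases hi : i < l.length
      · exact hi
      · omega

lemma minusztLoop_ge_of_nonneg (l : List Int) (i : Nat) (hle : i ≤ l.length)
    (hall : ∀ j, i ≤ j → ∀ h : j < l.length, 0 ≤ l[j]) :
    minusztLoop l i = l.length := by
  induction hn : l.length - i using Nat.strong_induction_on generalizing i with
  | _ n ih =>
    rw [minusztLoop]
    split
    · next h =>
      exact ih (l.length - (i+1)) (by omega) (i+1) (by simp at h; omega) (fun j hj hjl => hall j (by omega) hjl) rfl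
    · next h =>
      push_neg at h
      by_cases hi : i < l.length
      · exfalso
        have := hall i (le_refl i) hi
        have hg : PySem.List.pyGetD l (Int.ofNat i) 0 = l[i] := by
          simp [PySem.List.pyGetD, PySem.List.pyGet?, PySem.List.pyIdx?, hi]
        have := h hi
        rw [hg] at this; omega
      · omega

lemma minuszt_keres_eq_any (l : List Int) :
    minuszt_keres l = l.any (fun x => decide (x < 0)) := by
  unfold minuszt_keres
  by_cases hex : ∃ j, ∃ h : j < l.length, l[j] < 0
  · obtain ⟨j, hj, hneg⟩ := hex
    have h1 := minusztLoop_lt_of_neg l 0 ⟨j, Nat.zero_le _, hj, hneg⟩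
    simp [h1]
    exact ⟨l[j], List.getElem_mem hj, hneg⟩
  · push_neg at hex
    have h1 := minusztLoop_ge_of_nonneg l 0 (Nat.zero_le _) (fun j _ hjl => hex j hjl)
    simp [h1]
    intro x hx
    obtain ⟨j, hjl, rfl⟩ := List.mem_iff_getElem.mp hx
    exact hex j hjl

lemma minuszt_alt_eq_any (l : List Int) :
    minuszt_keres_alt l = l.any (fun x => decide (x < 0)) := by
  unfold minuszt_keres_alt
  cases l with
  | nil => simp
  | cons x t =>
    simp only [if_neg (by simp : ¬ (x :: t : List Int) = [])]
    rcases hm : PySem.List.min? (x :: t) (fun x => x) with _ | m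
    · exact absurd hm (by simp [PySem.List.min?_eq_none_iff])
    · have hmem := PySem.List.min?_mem hm
      have hmin := PySem.List.min?_isMin hm
      by_cases hneg : m < 0
      · have : ∃ y ∈ x :: t, y < 0 := ⟨m, hmem, hneg⟩
        simp only [hneg, decide_true]
        symm
        simp only [List.any_eq_true, decide_eq_true_eq]
        exact this
      · simp only [hneg, decide_false]
        symm
        simp only [List.any_eq_false]
        intro y hy
        have := hmin y hy
        intro hc
        exact absurd (of_decide_eq_true hc) (by omega)

-- ===== VERDICT (by name: the statement is the Claim_ definition above) =====
theorem minuszt_keres_spec : Claim_equal_minuszt_keres := by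
  intro l _
  unfold Spec_minuszt_keres
  rw [minuszt_keres_eq_any, minuszt_alt_eq_any]
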